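-- pv_equiv track=rewrite | github.com/JonSteinn/Kattis-Solutions | src/Compositions/Python 3/main.py | compositions
-- ===== SOURCE A (Python) =====
-- def compositions(n,m,k,mem):
--     if (n,m,k) not in mem:
--         if n==0:
--             return 1
--         s = 0
--         for i in range(n,0,-1):
--             if i % k != m:
--                 s += compositions(n-i,m,k,mem)
--         mem[(n,m,k)] = s
--     return mem[(n,m,k)]
-- ===== SOURCE B (Python) =====
-- def compositions(n, m, k, mem):
--     if (n, m, k) in mem:
--         return mem[(n, m, k)]
--     if n == 0:
--         return 1
--     if n < 0:
--         return 0
--     allowed = (m % k == m)   # can any part be forbidden at all?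
--     total = 0                # sum of dp[0..j-1]
--     res = {}                 # per-residue-class sums: res[r] = sum of dp[t], t<j, t%k == r
--     dpj = 0
--     for j in range(n + 1):
--         if (j, m, k) in mem:
--             dpj = mem[(j, m, k)]
--         elif j == 0:
--             dpj = 1
--         else:
--             dpj = total - (res.get((j - m) % k, 0) if allowed else 0)
--         total += dpj
--         if allowed:
--             res[j % k] = res.get(j % k, 0) + dpj
--     return dpj
-- ===== Notes on version B (the rewrite author's own statement) =====
-- stated objective: faster
-- what changed: Replaces the memoized recursion whose every state sums over all n smaller states by a bottom-up DP that gets each state in O(1) from one running total plus per-residue-class running sums (dp[j] = total - res[(j-m)%k]), still consulting the caller-supplied memo dict for pre-seeded entries.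
import Mathlib
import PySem

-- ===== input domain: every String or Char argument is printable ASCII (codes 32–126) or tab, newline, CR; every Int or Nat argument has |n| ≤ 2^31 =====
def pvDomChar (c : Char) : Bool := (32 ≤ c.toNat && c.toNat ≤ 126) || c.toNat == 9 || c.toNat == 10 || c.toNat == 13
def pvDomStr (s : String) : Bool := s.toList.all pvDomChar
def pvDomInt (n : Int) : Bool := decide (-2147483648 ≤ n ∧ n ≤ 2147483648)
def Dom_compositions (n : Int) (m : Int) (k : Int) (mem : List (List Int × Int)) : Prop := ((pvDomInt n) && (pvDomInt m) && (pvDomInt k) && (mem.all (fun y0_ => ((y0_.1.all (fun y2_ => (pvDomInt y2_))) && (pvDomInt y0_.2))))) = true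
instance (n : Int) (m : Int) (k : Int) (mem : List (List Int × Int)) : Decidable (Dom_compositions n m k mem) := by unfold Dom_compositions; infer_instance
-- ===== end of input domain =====

-- B replaces A's memoized recursion (each state summed over all smaller states) by a bottom-up
-- prefix-sum DP computing each state in O(1); A mutates its memo dict `mem` in place while B does
-- not — the equivalence proved here is about the RETURN value only.

-- ===== PORT A =====
-- A, transliterated: the memo dict is threaded through the recursion as state; the `for i in
-- range(n,0,-1)` loop is the mutual helper `compAloop` (carrying the range-membership fact needed
-- for termination).
mutual
def compAloop (m k n : Int) (d : PySem.Dict (List Int) Int) (s : Int)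
    (is : List Int) (h : ∀ i ∈ is, 1 ≤ i ∧ i ≤ n) : Int × PySem.Dict (List Int) Int :=
  match is, h with
  | [], _ => (s, d)
  | i :: rest, h =>
    if PySem.Int.mod i k ≠ m then
      let p := compA (n - i) m k d
      compAloop m k n p.2 (s + p.1) rest (fun j hj => h j (List.mem_cons_of_mem _ hj))
    else
      compAloop m k n d s rest (fun j hj => h j (List.mem_cons_of_mem _ hj))
  termination_by (n.toNat, 0, is.length)
  decreasing_by
  · have hi := h i (List.mem_cons_self ..)
    refine Prod.Lex.left _ _ ?_
    omega
  · exact Prod.Lex.right _ (Prod.Lex.right _ (by simp))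
  · exact Prod.Lex.right _ (Prod.Lex.right _ (by simp))

def compA (n m k : Int) (d : PySem.Dict (List Int) Int) : Int × PySem.Dict (List Int) Int :=
  match d.get? [n, m, k] with
  | some v => (v, d)
  | none =>
    if n = 0 then (1, d)
    else
      let p := compAloop m k n d 0 (PySem.List.pyRange n 0 (-1))
        (fun i hi => by
          have h2 := (PySem.List.mem_pyRange_neg_one (x := i) (a := n) (b := 0)).mp hi
          exact ⟨by omega, h2.2⟩)
      let d2 := p.2.insert [n, m, k] p.1
      ((d2.get? [n, m, k]).getD 0, d2)
  termination_by (n.toNat, 1, 0)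
  decreasing_by exact Prod.Lex.right _ (Prod.Lex.left _ _ (by omega))
end

def compositions (n : Int) (m : Int) (k : Int) (mem : List (List Int × Int)) : Int :=
  (compA n m k (PySem.Dict.mk mem)).1

-- ===== PORT B =====
-- one loop iteration of Source B: state = (total, res, dpj)
def compBstep (d : PySem.Dict (List Int) Int) (m k : Int) (allowed : Bool)
    (st : Int × PySem.Dict Int Int × Int) (j : Int) : Int × PySem.Dict Int Int × Int :=
  let dpj :=
    match d.get? [j, m, k] with
    | some v => v
    | none =>
      if j = 0 then 1
      else st.1 - (if allowed then st.2.1.getD (PySem.Int.mod (j - m) k) 0 else 0)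
  (st.1 + dpj,
   (if allowed then st.2.1.insert (PySem.Int.mod j k) (st.2.1.getD (PySem.Int.mod j k) 0 + dpj)
    else st.2.1),
   dpj)

def compositions_alt (n : Int) (m : Int) (k : Int) (mem : List (List Int × Int)) : Int :=
  let d := PySem.Dict.mk mem
  match d.get? [n, m, k] with
  | some v => v
  | none =>
    if n = 0 then 1
    else if n < 0 then 0
    else
      let allowed := PySem.Int.mod m k == m
      ((PySem.List.pyRange 0 (n + 1) 1).foldl (compBstep d m k allowed)
        (0, PySem.Dict.empty, 0)).2.2

-- ===== PRECONDITION & SPEC =====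
-- Pre_ excludes exactly the inputs where the Python A raises ZeroDivisionError (k = 0 with n ≥ 1
-- and the key (n,m,k) not memoized); B raises the same exception there.
def Pre_compositions (n : Int) (m : Int) (k : Int) (mem : List (List Int × Int)) : Prop :=
  k ≠ 0 ∨ n < 1 ∨ ((PySem.Dict.mk mem).get? [n, m, k]).isSome
instance (n : Int) (m : Int) (k : Int) (mem : List (List Int × Int)) : Decidable (Pre_compositions n m k mem) := by unfold Pre_compositions; infer_instance

def pvWitness_compositions : Int × Int × Int × (List (List Int × Int)) := (4, 0, 2, [])

def Spec_compositions (n : Int) (m : Int) (k : Int) (mem : List (List Int × Int)) (out : Int) : Prop := out = compositions_alt n m k mem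
instance (n : Int) (m : Int) (k : Int) (mem : List (List Int × Int)) (out : Int) : Decidable (Spec_compositions n m k mem out) := by unfold Spec_compositions; infer_instance

-- ===== CLAIM (what is proved, stated in full; the proofs are below) =====
def Claim_equal_compositions : Prop := ∀ (n : Int) (m : Int) (k : Int) (mem : List (List Int × Int)), Dom_compositions n m k mem → Pre_compositions n m k mem → Spec_compositions n m k mem (compositions n m k mem)

-- ===== LEMMAS AND PROOFS =====

-- the common reference value: vf m k d j = the composition count A computes for the state (j,m,k)
-- given the ORIGINAL memo d (memoized value if present, else A's recurrence)
def vf (m k : Int) (d : PySem.Dict (List Int) Int) : Nat → Int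
  | j =>
    match d.get? [(j : Int), m, k] with
    | some x => x
    | none =>
      if _ : j = 0 then 1
      else ((List.range j).attach.map
        (fun t => if PySem.Int.mod ((j : Int) - (t.1 : Int)) k ≠ m then vf m k d t.1 else 0)).sum
  termination_by j => j
  decreasing_by exact List.mem_range.mp t.2

lemma pvMod_eq_iff (k : Int) (hk : k ≠ 0) (a b : Int) :
    PySem.Int.mod a k = PySem.Int.mod b k ↔ k ∣ (a - b) := by
  have ha := PySem.Int.floordiv_mul_add_mod a k
  have hb := PySem.Int.floordiv_mul_add_mod b k
  constructor
  · intro h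
    exact ⟨PySem.Int.floordiv a k - PySem.Int.floordiv b k, by linear_combination hb - ha + h⟩
  · intro hdvd
    have hd2 : k ∣ (PySem.Int.mod a k - PySem.Int.mod b k) := by
      obtain ⟨q, hq⟩ := hdvd
      exact ⟨q - (PySem.Int.floordiv a k - PySem.Int.floordiv b k), by linear_combination ha - hb + hq⟩
    have hb2 : |PySem.Int.mod a k - PySem.Int.mod b k| < |k| := by
      rcases lt_or_gt_of_ne hk with hneg | hpos
      · have h1 := PySem.Int.mod_neg_bounds a hneg
        have h2 := PySem.Int.mod_neg_bounds b hneg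
        rw [abs_of_neg hneg, abs_lt]
        constructor <;> omega
      · have h1 := PySem.Int.mod_nonneg a hpos
        have h2 := PySem.Int.mod_nonneg b hpos
        have h3 := PySem.Int.mod_lt a hpos
        have h4 := PySem.Int.mod_lt b hpos
        rw [abs_of_pos hpos, abs_lt]
        constructor <;> omega
    have := Int.eq_zero_of_abs_lt_dvd ((abs_dvd k _).mpr hd2) hb2
    omega

lemma pvCond_iff (m k : Int) (hk : k ≠ 0) (j t : Int) :
    PySem.Int.mod (j - t) k = m ↔
      (PySem.Int.mod m k = m ∧ PySem.Int.mod t k = PySem.Int.mod (j - m) k) := by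
  have hmm : ∀ x : Int, k ∣ (PySem.Int.mod x k - x) := fun x =>
    ⟨-PySem.Int.floordiv x k, by linear_combination PySem.Int.floordiv_mul_add_mod x k⟩
  constructor
  · intro h
    have hdj := hmm (j - t)
    rw [h] at hdj
    constructor
    · have h2 : PySem.Int.mod m k = PySem.Int.mod (j - t) k :=
        (pvMod_eq_iff k hk _ _).mpr hdj
      rw [h2, h]
    · refine (pvMod_eq_iff k hk _ _).mpr ?_
      obtain ⟨q, hq⟩ := hdj
      exact ⟨q, by linear_combination hq⟩
  · rintro ⟨h1, h2⟩
    have h3 := (pvMod_eq_iff k hk t (j - m)).mp h2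
    have h4 : PySem.Int.mod (j - t) k = PySem.Int.mod m k := by
      refine (pvMod_eq_iff k hk _ _).mpr ?_
      obtain ⟨q, hq⟩ := h3
      exact ⟨-q, by linear_combination -hq⟩
    rw [h4, h1]

lemma vf_lookup (m k : Int) (d : PySem.Dict (List Int) Int) (j : Nat) (x : Int)
    (h : d.get? [(j : Int), m, k] = some x) : vf m k d j = x := by
  rw [vf, h]

lemma vf_none_zero (m k : Int) (d : PySem.Dict (List Int) Int)
    (h : d.get? [0, m, k] = none) : vf m k d 0 = 1 := by
  rw [vf]
  norm_num at h ⊢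
  rw [h]

lemma vf_none_pos (m k : Int) (d : PySem.Dict (List Int) Int) (j : Nat)
    (h : d.get? [(j : Int), m, k] = none) (hj : j ≠ 0) :
    vf m k d j = ((List.range j).map
      (fun (t : Nat) => if PySem.Int.mod ((j : Int) - (t : Int)) k ≠ m then vf m k d t else 0)).sum := by
  rw [vf, h]
  simp [hj]

def pvInv (m k : Int) (d0 d : PySem.Dict (List Int) Int) : Prop :=
  (∀ key v, d0.get? key = some v → d.get? key = some v) ∧
  (∀ key v, d.get? key = some v →
    d0.get? key = some v ∨ ∃ j : Nat, key = [(j : Int), m, k] ∧ v = vf m k d0 j)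

lemma pvInv_refl (m k : Int) (d0 : PySem.Dict (List Int) Int) : pvInv m k d0 d0 :=
  ⟨fun _ _ h => h, fun _ _ h => Or.inl h⟩

lemma compAloop_eq (m k : Int) (d0 : PySem.Dict (List Int) Int) (n : Int)
    (IH : ∀ (n' : Int) (d : PySem.Dict (List Int) Int), 0 ≤ n' → n'.toNat < n.toNat →
      pvInv m k d0 d →
      (compA n' m k d).1 = vf m k d0 n'.toNat ∧ pvInv m k d0 (compA n' m k d).2) :
    ∀ (is : List Int) (h : ∀ i ∈ is, 1 ≤ i ∧ i ≤ n) (s : Int)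
      (d : PySem.Dict (List Int) Int), pvInv m k d0 d →
      (compAloop m k n d s is h).1 = s + (is.map
        (fun i => if PySem.Int.mod i k ≠ m then vf m k d0 (n - i).toNat else 0)).sum ∧
      pvInv m k d0 (compAloop m k n d s is h).2 := by
  intro is
  induction is with
  | nil =>
    intro h s d hInv
    rw [compAloop]
    simpa using hInv
  | cons i rest ih =>
    intro h s d hInv
    have hi := h i (List.mem_cons_self ..)
    rw [compAloop]
    by_cases hc : PySem.Int.mod i k ≠ m
    · simp only [if_pos hc]
      obtain ⟨hv, hInv2⟩ := IH (n - i) d (by omega) (by omega) hInv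
      obtain ⟨hv2, hInv3⟩ := ih (fun j hj => h j (List.mem_cons_of_mem _ hj))
        (s + (compA (n - i) m k d).1) (compA (n - i) m k d).2 hInv2
      refine ⟨?_, hInv3⟩
      rw [hv2, hv]
      simp [hc]
      ring
    · simp only [if_neg hc]
      obtain ⟨hv2, hInv3⟩ := ih (fun j hj => h j (List.mem_cons_of_mem _ hj)) s d hInv
      refine ⟨?_, hInv3⟩
      rw [hv2]
      rw [Decidable.not_not] at hc
      simp [hc]

lemma compA_eq (m k : Int) (d0 : PySem.Dict (List Int) Int) :
    ∀ (N : Nat) (n : Int) (d : PySem.Dict (List Int) Int), n.toNat = N → 0 ≤ n →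
      pvInv m k d0 d →
      (compA n m k d).1 = vf m k d0 N ∧ pvInv m k d0 (compA n m k d).2 := by
  intro N
  induction N using Nat.strong_induction_on with
  | _ N IH =>
    intro n d hN hn hInv
    have hnN : n = (N : Int) := by omega
    rw [compA]
    cases hd : d.get? [n, m, k] with
    | some v =>
      simp only []
      refine ⟨?_, hInv⟩
      rcases hInv.2 _ _ hd with h0 | ⟨j, hkey, hval⟩
      · exact (vf_lookup m k d0 N v (by rw [← hnN]; exact h0)).symm
      · have hj : (j : Int) = n := by
          have := (List.cons.injEq _ _ _ _).mp hkey
          exact this.1.symm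
        have : j = N := by omega
        subst this
        exact hval
    | none =>
      by_cases h0 : n = 0
      · subst h0
        have hN0 : N = 0 := by omega
        subst hN0
        refine ⟨?_, ?_⟩
        · simp only [if_true]
          cases hd0 : d0.get? [0, m, k] with
          | some x => exact absurd (hInv.1 _ _ hd0) (by rw [hd]; simp)
          | none => rw [vf_none_zero m k d0 hd0]
        · simpa using hInv
      · simp only [if_neg h0]
        have hn1 : 1 ≤ n := by omega
        have hd0 : d0.get? [(N : Int), m, k] = none := by
          cases hd0 : d0.get? [(N : Int), m, k] with
          | none => rfl
          | some x =>
            have := hInv.1 _ _ hd0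
            rw [← hnN] at this
            rw [this] at hd
            exact absurd hd (by simp)
        have hpf : ∀ i ∈ PySem.List.pyRange n 0 (-1), 1 ≤ i ∧ i ≤ n := fun i hi => by
          have h2 := (PySem.List.mem_pyRange_neg_one (x := i) (a := n) (b := 0)).mp hi
          exact ⟨by omega, h2.2⟩
        obtain ⟨hval, hInv2⟩ := compAloop_eq m k d0 n
          (fun n' d' h1 h2 h3 => IH n'.toNat (by omega) n' d' rfl h1 h3)
          (PySem.List.pyRange n 0 (-1)) hpf 0 d hInv
        have hsum : (compAloop m k n d 0 (PySem.List.pyRange n 0 (-1)) hpf).1 = vf m k d0 N := by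
          rw [hval, PySem.List.pyRange_neg_one, List.map_map]
          have hrange : (n - 0).toNat = N := by omega
          rw [hrange]
          rw [vf_none_pos m k d0 N hd0 (by omega)]
          rw [zero_add]
          congr 1
          apply List.map_congr_left
          intro t ht
          have h2 : ((N : Int) - ((N : Int) - (t : Int))).toNat = t := by omega
          simp only [Function.comp_apply, hnN, h2]
        refine ⟨?_, ?_⟩
        · rw [PySem.Dict.get?_insert_self]
          simpa using hsum
        · constructor
          · intro key v hkv
            by_cases hkey : key = [n, m, k]
            · subst hkey
              rw [← hnN] at hd0
              rw [hd0] at hkv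
              exact absurd hkv (by simp)
            · rw [PySem.Dict.get?_insert_of_ne _ _ hkey]
              exact hInv2.1 _ _ hkv
          · intro key v hkv
            by_cases hkey : key = [n, m, k]
            · subst hkey
              rw [PySem.Dict.get?_insert_self] at hkv
              refine Or.inr ⟨N, by rw [hnN], ?_⟩
              have : v = (compAloop m k n d 0 (PySem.List.pyRange n 0 (-1)) hpf).1 := by
                injection hkv.symm
              rw [this, hsum]
            · rw [PySem.Dict.get?_insert_of_ne _ _ hkey] at hkv
              exact hInv2.2 _ _ hkv

lemma compositions_eq_vf (n m k : Int) (mem : List (List Int × Int)) (hn : 0 ≤ n) :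
    compositions n m k mem = vf m k (PySem.Dict.mk mem) n.toNat := by
  unfold compositions
  exact (compA_eq m k (PySem.Dict.mk mem) n.toNat n (PySem.Dict.mk mem) rfl hn
    (pvInv_refl m k _)).1

lemma sum_map_sub_int {α : Type} (l : List α) (f g : α → Int) :
    (l.map (fun a => f a - g a)).sum = (l.map f).sum - (l.map g).sum := by
  induction l with
  | nil => simp
  | cons a l ih => simp only [List.map_cons, List.sum_cons, ih]; ring

lemma sum_split (m k : Int) (hk : k ≠ 0) (d0 : PySem.Dict (List Int) Int) (j : Nat) :
    ((List.range j).map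
      (fun (t : Nat) => if PySem.Int.mod ((j : Int) - (t : Int)) k ≠ m then vf m k d0 t else 0)).sum
    = ((List.range j).map (vf m k d0)).sum -
      (if (PySem.Int.mod m k == m) then ((List.range j).map
        (fun (t : Nat) => if PySem.Int.mod (t : Int) k = PySem.Int.mod ((j : Int) - m) k
          then vf m k d0 t else 0)).sum else 0) := by
  by_cases hall : PySem.Int.mod m k = m
  · rw [if_pos (by simp [hall])]
    have hpt : ∀ t ∈ List.range j,
        (if PySem.Int.mod ((j : Int) - (t : Int)) k ≠ m then vf m k d0 t else 0)
        = vf m k d0 t - (if PySem.Int.mod (t : Int) k = PySem.Int.mod ((j : Int) - m) k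
            then vf m k d0 t else 0) := by
      intro t _
      by_cases hc : PySem.Int.mod ((j : Int) - (t : Int)) k = m
      · have h2 := ((pvCond_iff m k hk (j : Int) (t : Int)).mp hc).2
        simp [hc, h2]
      · have h2 : ¬ (PySem.Int.mod (t : Int) k = PySem.Int.mod ((j : Int) - m) k) :=
          fun hcon => hc ((pvCond_iff m k hk (j : Int) (t : Int)).mpr ⟨hall, hcon⟩)
        simp [hc, h2]
    rw [List.map_congr_left hpt, sum_map_sub_int]
  · rw [if_neg (by simp [hall])]
    have hpt : ∀ t ∈ List.range j,
        (if PySem.Int.mod ((j : Int) - (t : Int)) k ≠ m then vf m k d0 t else 0)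
        = vf m k d0 t := by
      intro t _
      rw [if_pos]
      intro hc
      exact hall ((pvCond_iff m k hk (j : Int) (t : Int)).mp hc).1
    rw [List.map_congr_left hpt]
    simp

def pvDp (d : PySem.Dict (List Int) Int) (m k : Int) (allowed : Bool)
    (st : Int × PySem.Dict Int Int × Int) (j : Int) : Int :=
  match d.get? [j, m, k] with
  | some v => v
  | none =>
    if j = 0 then 1
    else st.1 - (if allowed then st.2.1.getD (PySem.Int.mod (j - m) k) 0 else 0)

lemma compBstep_eq (d : PySem.Dict (List Int) Int) (m k : Int) (allowed : Bool)
    (st : Int × PySem.Dict Int Int × Int) (j : Int) :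
    compBstep d m k allowed st j =
      (st.1 + pvDp d m k allowed st j,
       (if allowed then st.2.1.insert (PySem.Int.mod j k)
          (st.2.1.getD (PySem.Int.mod j k) 0 + pvDp d m k allowed st j) else st.2.1),
       pvDp d m k allowed st j) := rfl

lemma pvDp_some (d : PySem.Dict (List Int) Int) (m k : Int) (allowed : Bool)
    (st : Int × PySem.Dict Int Int × Int) (j v : Int) (h : d.get? [j, m, k] = some v) :
    pvDp d m k allowed st j = v := by
  unfold pvDp; rw [h]

lemma pvDp_none (d : PySem.Dict (List Int) Int) (m k : Int) (allowed : Bool)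
    (st : Int × PySem.Dict Int Int × Int) (j : Int) (h : d.get? [j, m, k] = none) :
    pvDp d m k allowed st j =
      if j = 0 then 1
      else st.1 - (if allowed then st.2.1.getD (PySem.Int.mod (j - m) k) 0 else 0) := by
  unfold pvDp; rw [h]

lemma getD_empty (r : Int) : (PySem.Dict.empty : PySem.Dict Int Int).getD r 0 = 0 := by
  simp [PySem.Dict.getD, PySem.Dict.get?, PySem.Dict.empty]

lemma compB_loop (m k : Int) (hk : k ≠ 0) (d0 : PySem.Dict (List Int) Int) (J : Nat) :
    ((PySem.List.pyRange 0 ((J : Int) + 1) 1).foldl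
      (compBstep d0 m k (PySem.Int.mod m k == m)) (0, PySem.Dict.empty, 0)).1
      = ((List.range (J + 1)).map (vf m k d0)).sum ∧
    ((PySem.List.pyRange 0 ((J : Int) + 1) 1).foldl
      (compBstep d0 m k (PySem.Int.mod m k == m)) (0, PySem.Dict.empty, 0)).2.2
      = vf m k d0 J ∧
    ∀ r : Int, ((PySem.List.pyRange 0 ((J : Int) + 1) 1).foldl
      (compBstep d0 m k (PySem.Int.mod m k == m)) (0, PySem.Dict.empty, 0)).2.1.getD r 0
      = if (PySem.Int.mod m k == m) then ((List.range (J + 1)).map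
          (fun (t : Nat) => if PySem.Int.mod (t : Int) k = r then vf m k d0 t else 0)).sum
        else 0 := by
  induction J with
  | zero =>
    have h01 : ((0 : Nat) : Int) + 1 = 0 + 1 := by norm_num
    rw [h01, PySem.List.pyRange_one_singleton]
    simp only [List.foldl_cons, List.foldl_nil, compBstep_eq]
    have hdp : pvDp d0 m k (PySem.Int.mod m k == m) (0, PySem.Dict.empty, 0) 0
        = vf m k d0 0 := by
      cases hd : d0.get? [(0 : Int), m, k] with
      | some v =>
        rw [pvDp_some _ _ _ _ _ _ _ hd]
        exact (vf_lookup m k d0 0 v (by exact_mod_cast hd)).symm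
      | none =>
        rw [pvDp_none _ _ _ _ _ _ hd, if_pos rfl, (vf_none_zero m k d0 hd)]
    refine ⟨by simpa using hdp, by simpa using hdp, ?_⟩
    intro r
    by_cases hall : (PySem.Int.mod m k == m) = true
    · rw [hall] at hdp ⊢
      simp only [if_true]
      by_cases hr : r = PySem.Int.mod 0 k
      · subst hr
        rw [PySem.Dict.getD_insert_self]
        simp [hdp, List.range_one]
      · rw [PySem.Dict.getD_insert_of_ne _ _ _ hr, getD_empty]
        simp [Ne.symm hr]
    · have hf : (PySem.Int.mod m k == m) = false := by
        cases h2 : (PySem.Int.mod m k == m) <;> simp_all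
      rw [hf]
      simp
  | succ J ihJ =>
    obtain ⟨h1, h2, h3⟩ := ihJ
    have hsplit : PySem.List.pyRange 0 (((J + 1 : Nat) : Int) + 1) 1
        = PySem.List.pyRange 0 ((J : Int) + 1) 1 ++ [(J : Int) + 1] := by
      push_cast
      exact PySem.List.pyRange_one_succ_right (by omega)
    rw [hsplit, List.foldl_append]
    set st := (PySem.List.pyRange 0 ((J : Int) + 1) 1).foldl
      (compBstep d0 m k (PySem.Int.mod m k == m)) (0, PySem.Dict.empty, 0) with hst
    simp only [List.foldl_cons, List.foldl_nil, compBstep_eq]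
    have hdp : pvDp d0 m k (PySem.Int.mod m k == m) st ((J : Int) + 1) = vf m k d0 (J + 1) := by
      cases hd : d0.get? [(J : Int) + 1, m, k] with
      | some v =>
        rw [pvDp_some _ _ _ _ _ _ _ hd]
        exact (vf_lookup m k d0 (J + 1) v (by push_cast; exact hd)).symm
      | none =>
        rw [pvDp_none _ _ _ _ _ _ hd, if_neg (by omega : ¬ ((J : Int) + 1 = 0))]
        rw [h1, h3 (PySem.Int.mod ((J : Int) + 1 - m) k)]
        rw [vf_none_pos m k d0 (J + 1) (by push_cast; exact hd) (by omega)]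
        rw [sum_split m k hk d0 (J + 1)]
        by_cases hall : (PySem.Int.mod m k == m) = true <;> simp [hall]
    refine ⟨?_, by simpa using hdp, ?_⟩
    · show st.1 + pvDp d0 m k (PySem.Int.mod m k == m) st ((J : Int) + 1)
        = ((List.range (J + 1 + 1)).map (vf m k d0)).sum
      rw [List.range_succ, List.map_append, List.sum_append, h1, hdp]
      simp
    · intro r
      by_cases hall : (PySem.Int.mod m k == m) = true
      · rw [hall] at hdp h3 ⊢
        simp only [if_true]
        by_cases hr : r = PySem.Int.mod ((J : Int) + 1) k
        · subst hr
          rw [PySem.Dict.getD_insert_self, List.range_succ, List.map_append, List.sum_append]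
          simp only [List.map_cons, List.map_nil, List.sum_cons, List.sum_nil]
          rw [h3, if_pos rfl, hdp]
          rw [if_pos (by push_cast; ring)]
          ring
        · rw [PySem.Dict.getD_insert_of_ne _ _ _ hr, List.range_succ, List.map_append,
            List.sum_append]
          simp only [List.map_cons, List.map_nil, List.sum_cons, List.sum_nil]
          rw [h3, if_pos rfl]
          rw [if_neg (fun h => hr (by push_cast at h; omega))]
          simp
      · have hf : (PySem.Int.mod m k == m) = false := by
          cases h2 : (PySem.Int.mod m k == m) <;> simp_all
        rw [hf] at h3 ⊢
        simp only [Bool.false_eq_true, if_false]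
        rw [h3 r]
        simp

lemma alt_eq_vf (n m k : Int) (mem : List (List Int × Int)) (hk : k ≠ 0)
    (hd : (PySem.Dict.mk mem).get? [n, m, k] = none) (hn : 1 ≤ n) :
    compositions_alt n m k mem = vf m k (PySem.Dict.mk mem) n.toNat := by
  unfold compositions_alt
  simp only [hd]
  rw [if_neg (by omega : ¬ n = 0), if_neg (by omega : ¬ n < 0)]
  have hcast : n + 1 = ((n.toNat : Nat) : Int) + 1 := by omega
  rw [hcast]
  exact (compB_loop m k hk (PySem.Dict.mk mem) n.toNat).2.1

lemma compAloop_nil (m k n : Int) (d : PySem.Dict (List Int) Int) (s : Int)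
    (is : List Int) (h : ∀ i ∈ is, 1 ≤ i ∧ i ≤ n) (he : is = []) :
    compAloop m k n d s is h = (s, d) := by
  subst he
  rw [compAloop]

-- ===== VERDICT (by name: the statement is the Claim_ definition above) =====
theorem compositions_spec : Claim_equal_compositions := by
  intro n m k mem hdom hpre
  unfold Spec_compositions
  cases hd : (PySem.Dict.mk mem).get? [n, m, k] with
  | some v =>
    have ha : compositions n m k mem = v := by
      unfold compositions
      rw [compA]
      simp only [hd]
    have hb : compositions_alt n m k mem = v := by
      unfold compositions_alt
      simp only [hd]
    rw [ha, hb]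
  | none =>
    by_cases h0 : n = 0
    · subst h0
      have ha : compositions 0 m k mem = 1 := by
        unfold compositions
        rw [compA]
        simp only [hd]
        simp
      have hb : compositions_alt 0 m k mem = 1 := by
        unfold compositions_alt
        simp only [hd]
        simp
      rw [ha, hb]
    · by_cases hneg : n < 0
      · have ha : compositions n m k mem = 0 := by
          unfold compositions
          rw [compA]
          simp only [hd, if_neg h0]
          rw [compAloop_nil _ _ _ _ _ _ _
            (PySem.List.pyRange_neg_one_eq_nil (by omega : n ≤ (0 : Int)))]
          rw [PySem.Dict.get?_insert_self]
          rfl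
        have hb : compositions_alt n m k mem = 0 := by
          unfold compositions_alt
          simp only [hd, if_neg h0, if_pos hneg]
        rw [ha, hb]
      · have hn1 : 1 ≤ n := by omega
        have hk : k ≠ 0 := by
          unfold Pre_compositions at hpre
          rcases hpre with h | h | h
          · exact h
          · omega
          · rw [hd] at h
            simp at h
        rw [compositions_eq_vf n m k mem (by omega), alt_eq_vf n m k mem hk hd hn1]
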